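-- pv_equiv track=rewrite | github.com/goldflower/codility | Flags_faster.py | next_peak
-- ===== SOURCE A (Python) =====
-- def next_peak(peaks):
--     length = len(peaks)
--     next_peak_pos = [0] * length
--     next_peak_pos[-1] = -1
--     for i in range(length-2, -1, -1):
--         if peaks[i]:
--             next_peak_pos[i] = i
--         else:
--             next_peak_pos[i] = next_peak_pos[i+1]
--     return next_peak_pos
-- ===== SOURCE B (Python) =====
-- def next_peak(peaks):
--     length = len(peaks)
--     result = [0] * length
--     result[-1] = -1
--     pending = []
--     for i in range(length - 1):
--         pending.append(i)
--         if peaks[i]: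
--             for j in pending:
--                 result[j] = i
--             pending = []
--     for j in pending:
--         result[j] = -1
--     return result
-- ===== Notes on version B (the rewrite author's own statement) =====
-- stated objective: alternative
-- what changed: Replaced the backward adjacency pass (each cell copies its right neighbour) by a forward single pass that keeps a buffer of indices still awaiting their next peak and flushes the whole buffer when a peak is met.
import Mathlib
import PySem

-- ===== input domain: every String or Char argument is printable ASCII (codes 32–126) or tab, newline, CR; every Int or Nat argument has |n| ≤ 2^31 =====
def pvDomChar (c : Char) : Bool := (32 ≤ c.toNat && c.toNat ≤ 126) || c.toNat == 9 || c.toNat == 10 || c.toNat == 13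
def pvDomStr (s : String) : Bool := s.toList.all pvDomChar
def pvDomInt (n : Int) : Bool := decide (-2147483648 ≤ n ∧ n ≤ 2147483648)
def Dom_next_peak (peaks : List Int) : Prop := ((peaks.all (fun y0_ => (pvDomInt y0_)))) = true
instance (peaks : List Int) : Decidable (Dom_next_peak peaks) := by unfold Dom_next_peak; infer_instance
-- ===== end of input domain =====

-- B replaces A's backward neighbour-copying pass by a forward pass that keeps a buffer of
-- indices awaiting their next peak (objective: alternative decomposition, same cost).

-- ===== PORT A =====
def next_peak (peaks : List Int) : List Int :=
  let length : Int := peaks.length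
  let next_peak_pos := PySem.List.pySetD (List.replicate peaks.length (0 : Int)) (-1) (-1)
  (PySem.List.pyRange (length - 2) (-1) (-1)).foldl
    (fun r i =>
      if PySem.List.pyGetD peaks i 0 ≠ 0 then
        PySem.List.pySetD r i i
      else
        PySem.List.pySetD r i (PySem.List.pyGetD r (i + 1) 0)) next_peak_pos

-- ===== PORT B =====
def next_peak_alt (peaks : List Int) : List Int :=
  let length : Int := peaks.length
  let result := PySem.List.pySetD (List.replicate peaks.length (0 : Int)) (-1) (-1)
  let st := (PySem.List.pyRange 0 (length - 1) 1).foldl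
    (fun (st : List Int × List Int) i =>
      let pending := st.2 ++ [i]
      if PySem.List.pyGetD peaks i 0 ≠ 0 then
        (pending.foldl (fun r j => PySem.List.pySetD r j i) st.1, [])
      else
        (st.1, pending)) (result, [])
  st.2.foldl (fun r j => PySem.List.pySetD r j (-1)) st.1

-- ===== PRECONDITION & SPEC =====
-- Pre_ excludes only the empty list, on which Python A raises IndexError (next_peak_pos[-1]);
-- B raises IndexError there too.
def Pre_next_peak (peaks : List Int) : Prop := peaks ≠ []
instance (peaks : List Int) : Decidable (Pre_next_peak peaks) := by unfold Pre_next_peak; infer_instance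
def pvWitness_next_peak : List Int := [0, 3, 0]

def Spec_next_peak (peaks : List Int) (out : List Int) : Prop := out = next_peak_alt peaks
instance (peaks : List Int) (out : List Int) : Decidable (Spec_next_peak peaks out) := by unfold Spec_next_peak; infer_instance

-- ===== CLAIM (what is proved, stated in full; the proofs are below) =====
def Claim_equal_next_peak : Prop := ∀ (peaks : List Int), Dom_next_peak peaks → Pre_next_peak peaks → Spec_next_peak peaks (next_peak peaks)

-- ===== LEMMAS AND PROOFS =====


theorem pySetD_neg_one (xs : List Int) (v : Int) (h : xs ≠ []) :
    PySem.List.pySetD xs (-1) v = xs.set (xs.length - 1) v := by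
  have hl : 1 ≤ xs.length := List.length_pos_iff.mpr h
  rw [PySem.List.pySetD, PySem.List.pySet?, PySem.List.pyIdx?]
  simp [hl]

def fp (peaks : List Int) (i : Nat) : Int :=
  if i + 1 < peaks.length then
    (if peaks.getD i 0 ≠ 0 then (i : Int) else fp peaks (i + 1))
  else -1
termination_by peaks.length - i
decreasing_by omega

theorem fp_lt {peaks : List Int} {i : Nat} (h : i + 1 < peaks.length) :
    fp peaks i = if peaks.getD i 0 ≠ 0 then (i : Int) else fp peaks (i + 1) := by
  rw [fp]; simp [h]

theorem fp_last {peaks : List Int} {i : Nat} (h : ¬ i + 1 < peaks.length) :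
    fp peaks i = -1 := by
  rw [fp]; simp [h]

theorem fp_eq_of_peak {peaks : List Int} {j i : Nat} (hji : j ≤ i)
    (hi : i + 1 < peaks.length) (hp : peaks.getD i 0 ≠ 0)
    (hz : ∀ t, j ≤ t → t < i → peaks.getD t 0 = 0) : fp peaks j = (i : Int) := by
  have key : ∀ c j, i - j = c → j ≤ i → (∀ t, j ≤ t → t < i → peaks.getD t 0 = 0) →
      fp peaks j = (i : Int) := by
    intro c
    induction c with
    | zero =>
      intro j hc hji _
      have : j = i := by omega
      subst this
      rw [fp_lt hi, if_pos hp]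
    | succ c ih =>
      intro j hc hji hz
      have hjlt : j < i := by omega
      rw [fp_lt (by omega), if_neg (by simpa using hz j le_rfl hjlt)]
      exact ih (j + 1) (by omega) (by omega) (fun t ht h2 => hz t (by omega) h2)
  exact key (i - j) j rfl hji hz

theorem fp_eq_neg {peaks : List Int} {j : Nat}
    (hz : ∀ t, j ≤ t → t + 1 < peaks.length → peaks.getD t 0 = 0) : fp peaks j = -1 := by
  have key : ∀ c j, peaks.length - j = c →
      (∀ t, j ≤ t → t + 1 < peaks.length → peaks.getD t 0 = 0) → fp peaks j = -1 := by
    intro c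
    induction c with
    | zero =>
      intro j hc _
      exact fp_last (by omega)
    | succ c ih =>
      intro j hc hz
      by_cases h : j + 1 < peaks.length
      · rw [fp_lt h, if_neg (by simpa using hz j le_rfl h)]
        exact ih (j + 1) (by omega) (fun t ht h2 => hz t (by omega) h2)
      · exact fp_last h
  exact key (peaks.length - j) j rfl hz

theorem getD_set_comm (r : List Int) (k : Nat) (v : Int) (j : Nat) (hk : k < r.length) :
    (r.set k v).getD j 0 = if j = k then v else r.getD j 0 := by
  rcases Nat.lt_or_ge j r.length with hj | hj
  · rw [List.getD_eq_getElem _ _ (by simpa using hj), List.getD_eq_getElem _ _ hj]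
    rw [List.getElem_set]
    split_ifs with h1 h2 h3 <;> first | rfl | omega
  · rw [List.getD_eq_default _ _ (by simpa using hj), List.getD_eq_default _ _ hj]
    rw [if_neg (by omega)]

theorem backA (peaks : List Int) (n : Nat) (hn : n = peaks.length) :
    ∀ (k : Nat), k ≤ n - 1 → ∀ (r : List Int), r.length = n →
    (∀ j, k ≤ j → j < n → r.getD j 0 = fp peaks j) →
    ((PySem.List.pyRange ((k : Int) - 1) (-1) (-1)).foldl
      (fun r i =>
        if PySem.List.pyGetD peaks i 0 ≠ 0 then
          PySem.List.pySetD r i i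
        else
          PySem.List.pySetD r i (PySem.List.pyGetD r (i + 1) 0)) r).length = n ∧
    (∀ j, j < n →
      ((PySem.List.pyRange ((k : Int) - 1) (-1) (-1)).foldl
        (fun r i =>
          if PySem.List.pyGetD peaks i 0 ≠ 0 then
            PySem.List.pySetD r i i
          else
            PySem.List.pySetD r i (PySem.List.pyGetD r (i + 1) 0)) r).getD j 0 = fp peaks j) := by
  intro k
  induction k with
  | zero =>
    intro _ r hr hinv
    rw [show ((0 : Nat) : Int) - 1 = -1 by norm_num,
        PySem.List.pyRange_neg_one_eq_nil le_rfl]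
    exact ⟨hr, fun j hj => hinv j (Nat.zero_le j) hj⟩
  | succ k ih =>
    intro hk r hr hinv
    have hkn : k + 1 < n := by omega
    have hkl : (k : Nat) + 1 < peaks.length := by omega
    rw [show ((k + 1 : Nat) : Int) - 1 = (k : Int) by push_cast; ring,
        PySem.List.pyRange_neg_one_cons (by omega), List.foldl_cons]
    have hget : PySem.List.pyGetD peaks (k : Int) 0 = peaks.getD k 0 := by
      simp [PySem.List.pyGetD_natCast]
    have hget2 : PySem.List.pyGetD r ((k : Int) + 1) 0 = r.getD (k + 1) 0 := by
      rw [show ((k : Int) + 1) = ((k + 1 : Nat) : Int) by push_cast; ring,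
        PySem.List.pyGetD_natCast]
    have hset : ∀ v : Int, PySem.List.pySetD r (k : Int) v = r.set k v := by
      intro v; simp [PySem.List.pySetD_natCast]
    have hstep : (if PySem.List.pyGetD peaks (k : Int) 0 ≠ 0 then
          PySem.List.pySetD r (k : Int) (k : Int)
        else
          PySem.List.pySetD r (k : Int) (PySem.List.pyGetD r ((k : Int) + 1) 0))
        = r.set k (fp peaks k) := by
      rw [hget, hget2, hset, hset, fp_lt hkl]
      by_cases hp : peaks.getD k 0 ≠ 0
      · rw [if_pos hp, if_pos hp]
      · rw [if_neg hp, if_neg hp, hinv (k + 1) le_rfl hkn]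
    rw [hstep]
    refine ih (by omega) _ (by simpa using hr) (fun j hj hjn => ?_)
    rw [getD_set_comm _ _ _ _ (by omega)]
    rcases Nat.eq_or_lt_of_le hj with h | h
    · rw [if_pos h.symm, h]
    · rw [if_neg (by omega)]
      exact hinv j (by omega) hjn

theorem setRange (v : Int) : ∀ (c : Nat) (a b : Int), 0 ≤ a → (b - a).toNat = c →
    ∀ (r : List Int), b ≤ (r.length : Int) →
    ((PySem.List.pyRange a b 1).foldl (fun r j => PySem.List.pySetD r j v) r).length = r.length ∧
    (∀ j : Nat, ((PySem.List.pyRange a b 1).foldl (fun r j => PySem.List.pySetD r j v) r).getD j 0 =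
      if a ≤ (j : Int) ∧ (j : Int) < b then v else r.getD j 0) := by
  intro c
  induction c with
  | zero =>
    intro a b ha hc r hb
    rw [PySem.List.pyRange_one_eq_nil (by omega)]
    exact ⟨by rw [List.foldl_nil], fun j => by rw [List.foldl_nil, if_neg (by omega)]⟩
  | succ c ih =>
    intro a b ha hc r hb
    have hab : a < b := by omega
    rw [PySem.List.pyRange_one_cons hab, List.foldl_cons]
    have hset : PySem.List.pySetD r a v = r.set a.toNat v := PySem.List.pySetD_of_nonneg r v ha
    rw [hset]
    obtain ⟨hlen, hval⟩ := ih (a + 1) b (by omega) (by omega) (r.set a.toNat v)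
      (by simpa using hb)
    refine ⟨by simpa using hlen, fun j => ?_⟩
    rw [hval j, getD_set_comm _ _ _ _ (by omega)]
    by_cases h1 : a + 1 ≤ (j : Int) ∧ (j : Int) < b
    · rw [if_pos h1, if_pos (by omega)]
    · rw [if_neg h1]
      by_cases h2 : j = a.toNat
      · rw [if_pos h2, if_pos (by omega)]
      · rw [if_neg h2, if_neg (by omega)]


def stepB (peaks : List Int) (st : List Int × List Int) (i : Int) : List Int × List Int :=
  let pending := st.2 ++ [i]
  if PySem.List.pyGetD peaks i 0 ≠ 0 then
    (pending.foldl (fun r j => PySem.List.pySetD r j i) st.1, [])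
  else
    (st.1, pending)

def finB (st : List Int × List Int) : List Int :=
  st.2.foldl (fun r j => PySem.List.pySetD r j (-1)) st.1

theorem fwdB (peaks : List Int) (n : Nat) (hn : n = peaks.length) (hpos : 1 ≤ n) :
    ∀ (c : Nat) (i s : Nat), i + c = n - 1 → s ≤ i →
    ∀ (r : List Int), r.length = n → r.getD (n - 1) 0 = -1 →
    (∀ j, j < s → r.getD j 0 = fp peaks j) →
    (∀ t, s ≤ t → t < i → peaks.getD t 0 = 0) →
    (finB ((PySem.List.pyRange (i : Int) ((n : Int) - 1) 1).foldl (stepB peaks)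
        (r, PySem.List.pyRange (s : Int) (i : Int) 1))).length = n ∧
    (∀ j, j < n →
      (finB ((PySem.List.pyRange (i : Int) ((n : Int) - 1) 1).foldl (stepB peaks)
        (r, PySem.List.pyRange (s : Int) (i : Int) 1))).getD j 0 = fp peaks j) := by
  intro c
  induction c with
  | zero =>
    intro i s hc hs r hr hlast hfin hz
    have hi : i = n - 1 := by omega
    rw [show ((n : Int) - 1) = (i : Int) by omega,
        PySem.List.pyRange_one_eq_nil le_rfl, List.foldl_nil]
    obtain ⟨hlen, hval⟩ := setRange (-1) (i - s) (s : Int) (i : Int) (by omega) (by omega) r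
      (by omega)
    unfold finB
    refine ⟨by rw [hlen, hr], fun j hj => ?_⟩
    rw [hval j]
    by_cases h1 : (s : Int) ≤ (j : Int) ∧ (j : Int) < (i : Int)
    · rw [if_pos h1]
      exact (fp_eq_neg (fun t ht h2 => hz t (by omega) (by omega))).symm
    · rw [if_neg h1]
      rcases Nat.lt_or_ge j s with h2 | h2
      · exact hfin j h2
      · have : j = n - 1 := by omega
        rw [this, hlast, fp_last (by omega)]
  | succ c ih =>
    intro i s hc hs r hr hlast hfin hz
    have hin : i < n - 1 := by omega
    rw [show PySem.List.pyRange (i : Int) ((n : Int) - 1) 1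
          = (i : Int) :: PySem.List.pyRange ((i : Int) + 1) ((n : Int) - 1) 1
        from PySem.List.pyRange_one_cons (by omega), List.foldl_cons]
    have hpend : PySem.List.pyRange (s : Int) (i : Int) 1 ++ [(i : Int)]
        = PySem.List.pyRange (s : Int) ((i + 1 : Nat) : Int) 1 := by
      rw [show ((i + 1 : Nat) : Int) = (i : Int) + 1 by push_cast; ring,
        PySem.List.pyRange_one_succ_right (by omega)]
    have hgetp : PySem.List.pyGetD peaks (i : Int) 0 = peaks.getD i 0 := by
      simp [PySem.List.pyGetD_natCast]
    by_cases hp : peaks.getD i 0 ≠ 0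
    · have hstep : stepB peaks (r, PySem.List.pyRange (s : Int) (i : Int) 1) (i : Int)
          = ((PySem.List.pyRange (s : Int) ((i + 1 : Nat) : Int) 1).foldl
              (fun r j => PySem.List.pySetD r j (i : Int)) r,
             PySem.List.pyRange ((i + 1 : Nat) : Int) ((i + 1 : Nat) : Int) 1) := by
        unfold stepB
        simp only [hgetp, hpend]
        rw [if_pos hp, PySem.List.pyRange_one_eq_nil le_rfl]
      rw [show (i : Int) + 1 = ((i + 1 : Nat) : Int) by push_cast; ring, hstep]
      obtain ⟨hlen, hval⟩ := setRange (i : Int) (i + 1 - s) (s : Int) ((i + 1 : Nat) : Int)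
        (by omega) (by push_cast; omega) r (by push_cast; omega)
      refine ih (i + 1) (i + 1) (by omega) le_rfl _ (by rw [hlen, hr]) ?_ ?_ (by omega)
      · rw [hval (n - 1), if_neg (by push_cast; omega)]
        exact hlast
      · intro j hj
        rw [hval j]
        by_cases h1 : (s : Int) ≤ (j : Int) ∧ (j : Int) < ((i + 1 : Nat) : Int)
        · rw [if_pos h1]
          exact (fp_eq_of_peak (by omega) (by omega) hp
            (fun t ht h2 => hz t (by omega) h2)).symm
        · rw [if_neg h1]
          exact hfin j (by omega)
    · have hstep : stepB peaks (r, PySem.List.pyRange (s : Int) (i : Int) 1) (i : Int)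
          = (r, PySem.List.pyRange (s : Int) ((i + 1 : Nat) : Int) 1) := by
        unfold stepB
        simp only [hgetp, hpend]
        rw [if_neg hp]
      rw [show (i : Int) + 1 = ((i + 1 : Nat) : Int) by push_cast; ring, hstep]
      refine ih (i + 1) s (by omega) (by omega) r hr hlast hfin (fun t ht h2 => ?_)
      rcases Nat.lt_or_ge t i with h3 | h3
      · exact hz t ht h3
      · have : t = i := by omega
        rw [this]
        omega

theorem next_peak_eq_alt (peaks : List Int) (hpre : peaks ≠ []) :
    next_peak peaks = next_peak_alt peaks := by
  have hpos : 1 ≤ peaks.length := List.length_pos_iff.mpr hpre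
  have hr0 : PySem.List.pySetD (List.replicate peaks.length (0 : Int)) (-1) (-1)
      = (List.replicate peaks.length (0 : Int)).set (peaks.length - 1) (-1) := by
    rw [pySetD_neg_one _ _ (by simp; omega)]
    simp
  have hr0len : ((List.replicate peaks.length (0 : Int)).set (peaks.length - 1) (-1)).length
      = peaks.length := by simp
  have hr0last : ((List.replicate peaks.length (0 : Int)).set (peaks.length - 1) (-1)).getD
      (peaks.length - 1) 0 = -1 := by
    rw [getD_set_comm _ _ _ _ (by simp; omega), if_pos rfl]
  obtain ⟨haLen, haVal⟩ := backA peaks peaks.length rfl (peaks.length - 1) le_rfl _ hr0len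
    (fun j hj hjn => by
      have hje : j = peaks.length - 1 := by omega
      rw [hje, hr0last, fp_last (by omega)])
  obtain ⟨hbLen, hbVal⟩ := fwdB peaks peaks.length rfl hpos (peaks.length - 1) 0 0 (by omega)
    (Nat.zero_le _) _ hr0len hr0last (fun j hj => absurd hj (Nat.not_lt_zero j))
    (fun t ht h2 => absurd h2 (by omega))
  simp only [Nat.cast_zero] at hbLen hbVal
  rw [PySem.List.pyRange_one_eq_nil le_rfl] at hbLen hbVal
  have hA : next_peak peaks = (PySem.List.pyRange (((peaks.length - 1 : Nat) : Int) - 1) (-1) (-1)).foldl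
      (fun r i =>
        if PySem.List.pyGetD peaks i 0 ≠ 0 then
          PySem.List.pySetD r i i
        else
          PySem.List.pySetD r i (PySem.List.pyGetD r (i + 1) 0))
      ((List.replicate peaks.length (0 : Int)).set (peaks.length - 1) (-1)) := by
    simp only [next_peak]
    rw [hr0, show (peaks.length : Int) - 2 = ((peaks.length - 1 : Nat) : Int) - 1 by omega]
  have hB : next_peak_alt peaks = finB ((PySem.List.pyRange 0 ((peaks.length : Int) - 1) 1).foldl
      (stepB peaks) ((List.replicate peaks.length (0 : Int)).set (peaks.length - 1) (-1), [])) := by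
    simp only [next_peak_alt]
    rw [hr0]
    rfl
  rw [hA, hB]
  apply List.ext_getElem (by rw [haLen, hbLen])
  intro j hj1 hj2
  have hjn : j < peaks.length := by rw [haLen] at hj1; exact hj1
  rw [← List.getD_eq_getElem _ 0 hj1, ← List.getD_eq_getElem _ 0 hj2, haVal j hjn, hbVal j hjn]

-- ===== VERDICT (by name: the statement is the Claim_ definition above) =====
theorem next_peak_spec : Claim_equal_next_peak := by
  intro peaks _ hpre
  exact next_peak_eq_alt peaks hpre
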